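-- pv_equiv track=rewrite | github.com/bibleman-stan/readers-bofm | build_book.py | _build_text_map
-- ===== SOURCE A (Python) =====
-- def _build_text_map(html):
--     """Build a mapping between text-only positions and HTML positions.
--
--     Returns (plain_text, text_to_html_map) where text_to_html_map[i] gives
--     the HTML position corresponding to plain_text[i]. This allows us to find
--     phrases in plain text and map match positions back to the original HTML.
--     """
--     plain_chars = []
--     text_to_html = []
--     i = 0
--     in_tag = False
--     while i < len(html):
--         if html[i] == '<':
--             in_tag = True
--             i += 1
--         elif html[i] == '>' and in_tag:
--             in_tag = False
--             i += 1
--         elif in_tag: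
--             i += 1
--         else:
--             plain_chars.append(html[i])
--             text_to_html.append(i)
--             i += 1
--     # Sentinel for end-of-string mapping
--     text_to_html.append(len(html))
--     return ''.join(plain_chars), text_to_html
-- ===== SOURCE B (Python) =====
-- def _build_text_map(html):
--     """Build a mapping between text-only positions and HTML positions.
--
--     Find-based chunk copier: copies each tag-free chunk wholesale instead of
--     stepping one character at a time with an in_tag flag.
--     """
--     chars = []
--     text_to_html = []
--     n = len(html)
--     pos = 0
--     while pos < n:
--         lt = html.find('<', pos)
--         if lt == -1:
--             chars.append(html[pos:])
--             text_to_html.extend(range(pos, n))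
--             break
--         chars.append(html[pos:lt])
--         text_to_html.extend(range(pos, lt))
--         gt = html.find('>', lt)
--         if gt == -1:
--             break
--         pos = gt + 1
--     text_to_html.append(n)
--     return ''.join(chars), text_to_html
-- ===== Notes on version B (the rewrite author's own statement) =====
-- stated objective: faster
-- what changed: Replaced the per-character while loop with an in_tag boolean flag by a find-based chunk copier that appends each tag-free chunk and its index range wholesale and skips each whole tag with str.find, reproducing exactly the original's handling of stray or unmatched angle brackets.
import Mathlib
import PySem

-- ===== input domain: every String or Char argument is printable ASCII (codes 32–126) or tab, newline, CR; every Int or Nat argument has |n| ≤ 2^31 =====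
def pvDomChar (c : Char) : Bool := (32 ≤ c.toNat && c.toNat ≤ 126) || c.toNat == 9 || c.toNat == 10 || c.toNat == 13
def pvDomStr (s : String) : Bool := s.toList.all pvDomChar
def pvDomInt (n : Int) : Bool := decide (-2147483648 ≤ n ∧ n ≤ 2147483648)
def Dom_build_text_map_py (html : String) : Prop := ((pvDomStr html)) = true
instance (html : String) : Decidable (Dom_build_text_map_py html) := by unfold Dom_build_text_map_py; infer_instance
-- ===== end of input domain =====

-- B replaces A's per-character in_tag state machine by a find-based chunk copier
-- (copy each tag-free chunk and its index range wholesale, skip each tag with find('>')).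

-- ===== PORT A =====
-- while-loop over characters with an in_tag flag, transliterated as structural recursion
def pvAGo : List Char → Int → Bool → List Char × List Int
  | [], _, _ => ([], [])
  | c :: cs, i, tag =>
    if c = '<' then pvAGo cs (i + 1) true
    else if c = '>' ∧ tag = true then pvAGo cs (i + 1) false
    else if tag = true then pvAGo cs (i + 1) tag
    else
      let r := pvAGo cs (i + 1) tag
      (c :: r.1, i :: r.2)

def build_text_map_py (html : String) : String × List Int :=
  let r := pvAGo html.toList 0 false
  (String.ofList r.1, r.2 ++ [(html.toList.length : Int)])

-- ===== PORT B =====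
-- while-loop over positions with html.find, transliterated with a fuel counter
-- (fuel = len+1 suffices: every iteration advances pos)
def pvBGo (s : List Char) : Nat → Nat → List Char × List Int
  | _, 0 => ([], [])
  | pos, fuel + 1 =>
    if pos < s.length then
      let lt := PySem.Chars.findFrom s ['<'] (pos : Int)
      if lt = -1 then
        (PySem.List.slice s (some (pos : Int)) none,
         PySem.List.pyRange (pos : Int) (s.length : Int))
      else
        let gt := PySem.Chars.findFrom s ['>'] lt
        if gt = -1 then
          (PySem.List.slice s (some (pos : Int)) (some lt),
           PySem.List.pyRange (pos : Int) lt)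
        else
          let r := pvBGo s (gt.toNat + 1) fuel
          (PySem.List.slice s (some (pos : Int)) (some lt) ++ r.1,
           PySem.List.pyRange (pos : Int) lt ++ r.2)
    else ([], [])

def build_text_map_py_alt (html : String) : String × List Int :=
  let r := pvBGo html.toList 0 (html.toList.length + 1)
  (String.ofList r.1, r.2 ++ [(html.toList.length : Int)])

-- ===== PRECONDITION & SPEC =====
def Spec_build_text_map_py (html : String) (out : String × List Int) : Prop := out = build_text_map_py_alt html
instance (html : String) (out : String × List Int) : Decidable (Spec_build_text_map_py html out) := by unfold Spec_build_text_map_py; infer_instance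

-- ===== CLAIM (what is proved, stated in full; the proofs are below) =====
def Claim_equal_build_text_map_py : Prop := ∀ (html : String), Dom_build_text_map_py html → Spec_build_text_map_py html (build_text_map_py html)

-- ===== LEMMAS AND PROOFS =====

lemma pvRange_nil {a b : Int} (h : b ≤ a) : PySem.List.pyRange a b = [] := by
  simp [PySem.List.pyRange_of_pos a b (by norm_num : (0:Int) < 1), h]

lemma pvSingleton_prefix {a : Char} {t : List Char} : [a] <+: t ↔ ∃ u, t = a :: u := by
  constructor
  · rintro ⟨u, rfl⟩; exact ⟨u, rfl⟩
  · rintro ⟨u, rfl⟩; exact ⟨u, rfl⟩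

-- A with the flag off and no '<' ahead copies everything
lemma pvAGo_noLt (t : List Char) (h : '<' ∉ t) (i : Int) :
    pvAGo t i false = (t, PySem.List.pyRange i (i + t.length)) := by
  induction t generalizing i with
  | nil => simp [pvAGo, pvRange_nil (le_refl i)]
  | cons c cs ih =>
    have hc : c ≠ '<' := fun h' => h (h' ▸ List.mem_cons_self)
    have h' : '<' ∉ cs := fun hm => h (List.mem_cons_of_mem _ hm)
    simp only [pvAGo, if_neg hc, List.length_cons]
    rw [if_neg (by simp), if_neg (by simp)]
    have hlt : i < i + ((cs.length : Int) + 1) := by omega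
    rw [ih h']
    push_cast
    rw [PySem.List.pyRange_one_cons hlt]
    rw [show i + 1 + (cs.length : Int) = i + ((cs.length : Int) + 1) from by ring]

-- A with the flag off, a '<'-free chunk then '<': copies the chunk, enters the tag
lemma pvAGo_chunk (t u : List Char) (h : '<' ∉ t) (i : Int) :
    pvAGo (t ++ '<' :: u) i false =
      (t ++ (pvAGo u (i + t.length + 1) true).1,
       PySem.List.pyRange i (i + t.length) ++ (pvAGo u (i + t.length + 1) true).2) := by
  induction t generalizing i with
  | nil => simp [pvAGo, pvRange_nil (le_refl i)]
  | cons c cs ih =>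
    have hc : c ≠ '<' := fun h' => h (h' ▸ List.mem_cons_self)
    have h' : '<' ∉ cs := fun hm => h (List.mem_cons_of_mem _ hm)
    simp only [List.cons_append, pvAGo, if_neg hc, List.length_cons]
    rw [if_neg (by simp), if_neg (by simp)]
    have hlt : i < i + ((cs.length : Int) + 1) := by omega
    rw [ih h']
    push_cast
    rw [PySem.List.pyRange_one_cons hlt]
    rw [show i + 1 + (cs.length : Int) = i + ((cs.length : Int) + 1) from by ring]
    rfl

-- A with the flag on and no '>' ahead drops everything
lemma pvAGo_noGt (t : List Char) (h : '>' ∉ t) (i : Int) : pvAGo t i true = ([], []) := by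
  induction t generalizing i with
  | nil => rfl
  | cons c cs ih =>
    have hc : c ≠ '>' := fun h' => h (h' ▸ List.mem_cons_self)
    have h' : '>' ∉ cs := fun hm => h (List.mem_cons_of_mem _ hm)
    by_cases hlt : c = '<' <;> simp [pvAGo, hlt, hc, ih h']

-- A with the flag on skips up to and past the first '>'
lemma pvAGo_skipTo (t u : List Char) (h : '>' ∉ t) (i : Int) :
    pvAGo (t ++ '>' :: u) i true = pvAGo u (i + t.length + 1) false := by
  induction t generalizing i with
  | nil => simp [pvAGo]
  | cons c cs ih =>
    have hc : c ≠ '>' := fun h' => h (h' ▸ List.mem_cons_self)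
    have h' : '>' ∉ cs := fun hm => h (List.mem_cons_of_mem _ hm)
    have harg : i + 1 + (cs.length : Int) + 1 = i + ((cs.length : Int) + 1) + 1 := by ring
    by_cases hlt : c = '<' <;>
      simp [pvAGo, hlt, hc, ih h', List.length_cons] <;> rw [← harg]

lemma pvBGo_eq_pvAGo (s : List Char) (fuel : Nat) : ∀ pos : Nat, pos ≤ s.length →
    s.length - pos < fuel →
    pvBGo s pos fuel = pvAGo (s.drop pos) (pos : Int) false := by
  induction fuel with
  | zero => intro pos h1 h2; omega
  | succ fuel ih =>
    intro pos hpos hfuel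
    by_cases hlt : pos < s.length
    · simp only [pvBGo, if_pos hlt]
      rw [PySem.Chars.findFrom_natCast s ['<'] pos hpos]
      by_cases hfneg : PySem.Chars.find (s.drop pos) ['<'] = -1
      · rw [if_pos (by rw [if_pos hfneg])]
        have hnoLt : '<' ∉ s.drop pos := by
          have := (PySem.Chars.find_eq_neg_one_iff (s.drop pos) ['<']).mp hfneg
          simpa [List.singleton_infix_iff] using this
        rw [pvAGo_noLt _ hnoLt]
        rw [PySem.List.slice_from_natCast]
        rw [show ((pos:Int) + ((s.drop pos).length : Int)) = (s.length : Int) from by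
          simp [List.length_drop]; omega]
      · have hf0 : 0 ≤ PySem.Chars.find (s.drop pos) ['<'] := by
          have := PySem.Chars.neg_one_le_find (s.drop pos) ['<']; omega
        obtain ⟨hpre, hmin⟩ := PySem.Chars.find_spec hf0
        set k := (PySem.Chars.find (s.drop pos) ['<']).toNat with hkdef
        have hfk : PySem.Chars.find (s.drop pos) ['<'] = (k : Int) :=
          (Int.toNat_of_nonneg hf0).symm
        obtain ⟨u, hu⟩ := pvSingleton_prefix.mp hpre
        have hdd : (s.drop pos).drop k = s.drop (pos + k) := by
          rw [List.drop_drop]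
        have hulen : (s.drop pos).length = k + (u.length + 1) := by
          have := congrArg List.length hu
          simp [List.length_drop] at this ⊢
          omega
        have hklt : pos + k < s.length := by
          have := congrArg List.length hu
          simp [List.length_drop] at this
          omega
        have hTlen : ((s.drop pos).take k).length = k := by
          simp [List.length_take, List.length_drop]
          omega
        have hTno : '<' ∉ (s.drop pos).take k := by
          intro hmem
          obtain ⟨j, hj, hget⟩ := List.getElem_of_mem hmem
          have hjk : j < k := hTlen ▸ hj
          apply hmin j hjk
          rw [pvSingleton_prefix]
          refine ⟨(s.drop pos).drop (j + 1), ?_⟩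
          rw [List.drop_eq_getElem_cons (by simp [List.length_drop]; omega)]
          congr 1
          rw [← hget, List.getElem_take]
        have hsplit : s.drop pos = (s.drop pos).take k ++ '<' :: u := by
          conv_lhs => rw [← List.take_append_drop k (s.drop pos)]
          rw [hu]
        have hdropk : s.drop (pos + k) = '<' :: u := by rw [← hdd, hu]
        rw [if_neg (by rw [if_neg hfneg, hfk]; omega)]
        rw [if_neg hfneg, hfk,
          show ((pos:Int) + (k:Int)) = ((pos + k : Nat) : Int) from by push_cast; ring]
        rw [PySem.Chars.findFrom_natCast s ['>'] (pos + k) (le_of_lt hklt)]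
        conv_rhs => rw [hsplit, pvAGo_chunk _ u hTno]
        rw [hTlen]
        by_cases hgneg : PySem.Chars.find (s.drop (pos + k)) ['>'] = -1
        · rw [if_pos (by rw [if_pos hgneg])]
          have hnoGt : '>' ∉ u := by
            have := (PySem.Chars.find_eq_neg_one_iff (s.drop (pos + k)) ['>']).mp hgneg
            rw [hdropk] at this
            simp [List.singleton_infix_iff] at this
            exact this
          rw [pvAGo_noGt u hnoGt]
          rw [PySem.List.slice_natCast, Nat.add_sub_cancel_left]
          rw [show ((pos:Int) + (k:Int)) = ((pos + k : Nat) : Int) from by push_cast; ring]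
          simp
        · have hg0 : 0 ≤ PySem.Chars.find (s.drop (pos + k)) ['>'] := by
            have := PySem.Chars.neg_one_le_find (s.drop (pos + k)) ['>']; omega
          obtain ⟨hpre2, hmin2⟩ := PySem.Chars.find_spec hg0
          obtain ⟨m, hgm⟩ : ∃ m : Nat, PySem.Chars.find (s.drop (pos + k)) ['>'] = (m : Int) :=
            ⟨_, (Int.toNat_of_nonneg hg0).symm⟩
          rw [hgm, Int.toNat_natCast] at hpre2 hmin2
          rw [hdropk] at hpre2 hmin2
          obtain ⟨v, hv⟩ := pvSingleton_prefix.mp hpre2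
          have hm1 : 1 ≤ m := by
            rcases Nat.eq_zero_or_pos m with hm0 | hm0
            · rw [hm0] at hv
              simp at hv
            · exact hm0
          obtain ⟨m', rfl⟩ : ∃ m', m = m' + 1 := ⟨m - 1, by omega⟩
          rw [List.drop_succ_cons] at hv
          have hslen : s.length = pos + k + u.length + 1 := by
            have h1 : (s.drop pos).length = s.length - pos := List.length_drop
            omega
          have hvlen : m' < u.length := by
            have := congrArg List.length hv
            simp [List.length_drop] at this
            omega
          have hMno : '>' ∉ u.take m' := by
            intro hmem
            obtain ⟨j, hj, hget⟩ := List.getElem_of_mem hmem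
            have hjm : j < m' := by
              have : (u.take m').length = m' := by simp; omega
              omega
            apply hmin2 (j + 1) (by omega)
            rw [pvSingleton_prefix]
            refine ⟨u.drop (j + 1), ?_⟩
            rw [List.drop_succ_cons]
            rw [List.drop_eq_getElem_cons (by omega)]
            congr 1
            rw [← hget, List.getElem_take]
          have husplit : u = u.take m' ++ '>' :: v := by
            conv_lhs => rw [← List.take_append_drop m' u]
            rw [hv]
          conv_rhs => rw [husplit, pvAGo_skipTo _ v hMno]
          rw [if_neg (by rw [if_neg hgneg, hgm]; omega)]
          rw [if_neg hgneg, hgm,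
            show (((pos + k : Nat) : Int) + ((m' + 1 : Nat) : Int)) = ((pos + k + m' + 1 : Nat) : Int) from by
              push_cast; ring]
          rw [show (((pos + k + m' + 1 : Nat) : Int)).toNat = pos + k + m' + 1 from Int.toNat_natCast _]
          rw [ih (pos + k + m' + 2) (by omega) (by omega)]
          have hdropv : s.drop (pos + k + m' + 2) = v := by
            rw [show pos + k + m' + 2 = (pos + k) + (m' + 2) from by omega, ← List.drop_drop,
              hdropk, show ('<' :: u).drop (m' + 2) = u.drop (m' + 1) from rfl,
              show m' + 1 = m' + 1 from rfl, ← List.drop_drop, hv]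
            rfl
          rw [show pos + k + m' + 1 + 1 = pos + k + m' + 2 from rfl, hdropv]
          rw [PySem.List.slice_natCast, Nat.add_sub_cancel_left]
          rw [show ((pos:Int) + (k:Int)) = ((pos + k : Nat) : Int) from by push_cast; ring]
          have hlen2 : (u.take m').length = m' := by simp; omega
          rw [hlen2]
          rw [show ((pos + k : Nat) : Int) + 1 + (m' : Int) + 1
              = ((pos + k + m' + 2 : Nat) : Int) from by push_cast; ring]
    · have hge : s.length ≤ pos := not_lt.mp hlt
      simp [pvBGo, hlt, List.drop_of_length_le hge, pvAGo]

-- ===== VERDICT (by name: the statement is the Claim_ definition above) =====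
theorem build_text_map_py_spec : Claim_equal_build_text_map_py := by
  intro html _
  unfold Spec_build_text_map_py build_text_map_py build_text_map_py_alt
  rw [pvBGo_eq_pvAGo html.toList (html.toList.length + 1) 0 (Nat.zero_le _) (by omega)]
  simp
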